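-- pv_equiv track=rewrite | github.com/JackWPP/workflow_news | app/services/pipeline.py | _looks_like_verification_wall
-- ===== SOURCE A (Python) =====
-- def _looks_like_verification_wall(title: str | None, content: str | None) -> bool:
--     combined = f"{title or ''} {content or ''}".lower()
--     return any(
--         token in combined
--         for token in [
--             "正在验证",
--             "安全验证",
--             "verify you are human",
--             "verification required",
--             "captcha",
--             "访问验证",
--         ]
--     )
-- ===== SOURCE B (Python) =====
-- # B: first-character dispatch — scan the combined text once; at each position only
-- # the tokens whose first character matches are tested, instead of six full scans.
-- _BY_FIRST = {}
-- for _t in ("正在验证", "安全验证", "verify you are human",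
--            "verification required", "captcha", "访问验证"):
--     _BY_FIRST.setdefault(_t[0], []).append(_t)
--
--
-- def _looks_like_verification_wall(title, content):
--     combined = (title or '').lower() + ' ' + (content or '').lower()
--     for i, ch in enumerate(combined):
--         for tok in _BY_FIRST.get(ch, ()):
--             if combined.startswith(tok, i):
--                 return True
--     return False
-- ===== Notes on version B (the rewrite author's own statement) =====
-- stated objective: alternative
-- what changed: Replaced six independent full-text substring scans with one scan over the combined text using a first-character dispatch table, so at each position only tokens whose first character matches are tested.
import Mathlib
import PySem

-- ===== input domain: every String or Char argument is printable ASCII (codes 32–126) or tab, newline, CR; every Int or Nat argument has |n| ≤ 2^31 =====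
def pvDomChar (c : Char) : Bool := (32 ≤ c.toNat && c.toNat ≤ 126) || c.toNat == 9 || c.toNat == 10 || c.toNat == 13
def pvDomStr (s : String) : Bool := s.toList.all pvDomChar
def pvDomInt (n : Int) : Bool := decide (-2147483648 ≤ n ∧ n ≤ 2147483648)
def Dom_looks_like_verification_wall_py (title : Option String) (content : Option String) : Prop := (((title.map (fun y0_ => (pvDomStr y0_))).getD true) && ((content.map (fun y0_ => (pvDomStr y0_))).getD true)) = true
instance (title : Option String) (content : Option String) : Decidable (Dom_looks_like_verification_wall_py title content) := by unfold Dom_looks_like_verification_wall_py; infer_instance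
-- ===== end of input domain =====

-- B replaces six independent `in` substring scans with a single scan over the combined
-- text driven by a first-character dispatch table (only tokens whose first character
-- matches the current position are tested).
-- ===== PORT A =====
def pvTokens : List String :=
  ["正在验证", "安全验证", "verify you are human", "verification required", "captcha", "访问验证"]

def looks_like_verification_wall_py (title : Option String) (content : Option String) : Bool :=
  let combined := PySem.Str.lower ((title.getD "") ++ " " ++ (content.getD ""))
  pvTokens.any (fun token => PySem.Str.isIn token combined)

-- ===== PORT B =====
-- _BY_FIRST: dispatch from first character to the token lists (as Lean char lists)
def pvByFirst (c : Char) : List (List Char) :=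
  if c = '正' then ["正在验证".toList]
  else if c = '安' then ["安全验证".toList]
  else if c = 'v' then ["verify you are human".toList, "verification required".toList]
  else if c = 'c' then ["captcha".toList]
  else if c = '访' then ["访问验证".toList]
  else []

def looks_like_verification_wall_py_alt (title : Option String) (content : Option String) : Bool :=
  -- combined = (title or '').lower() + ' ' + (content or '').lower()
  let cs := PySem.Chars.lower (title.getD "").toList ++ [' '] ++ PySem.Chars.lower (content.getD "").toList
  -- for i, ch in enumerate(combined): for tok in _BY_FIRST.get(ch, ()): if combined.startswith(tok, i): return True
  (PySem.List.enumerate cs).any (fun p =>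
    (pvByFirst p.2).any (fun tok => PySem.Chars.startswith (cs.drop p.1.toNat) tok))

-- ===== PRECONDITION & SPEC =====
def Spec_looks_like_verification_wall_py (title : Option String) (content : Option String) (out : Bool) : Prop := out = looks_like_verification_wall_py_alt title content
instance (title : Option String) (content : Option String) (out : Bool) : Decidable (Spec_looks_like_verification_wall_py title content out) := by unfold Spec_looks_like_verification_wall_py; infer_instance

-- ===== CLAIM =====
def Claim_equal_looks_like_verification_wall_py : Prop := ∀ (title : Option String) (content : Option String), Dom_looks_like_verification_wall_py title content → Spec_looks_like_verification_wall_py title content (looks_like_verification_wall_py title content)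

-- ===== LEMMAS AND PROOFS =====
-- the dispatch table is exactly "tokens grouped by first character"
lemma byFirst_spec (c : Char) (u : List Char) :
    u ∈ pvByFirst c ↔ ∃ t ∈ pvTokens, u = t.toList ∧ u.head? = some c := by
  have mem : ∀ t : String, t ∈ pvTokens ↔
      (t = "正在验证" ∨ t = "安全验证" ∨ t = "verify you are human" ∨
       t = "verification required" ∨ t = "captcha" ∨ t = "访问验证") := by
    intro t; simp [pvTokens]
  unfold pvByFirst
  split_ifs with h1 h2 h3 h4 h5
  · subst h1
    constructor
    · intro hu
      simp only [List.mem_singleton] at hu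
      exact ⟨"正在验证", (mem _).mpr (by tauto), hu, hu ▸ (by decide)⟩
    · rintro ⟨t, ht, rfl, hh⟩
      rcases (mem t).mp ht with rfl | rfl | rfl | rfl | rfl | rfl <;> revert hh <;> decide
  · subst h2
    constructor
    · intro hu
      simp only [List.mem_singleton] at hu
      exact ⟨"安全验证", (mem _).mpr (by tauto), hu, hu ▸ (by decide)⟩
    · rintro ⟨t, ht, rfl, hh⟩
      rcases (mem t).mp ht with rfl | rfl | rfl | rfl | rfl | rfl <;> revert hh <;> decide
  · subst h3
    constructor
    · intro hu
      simp only [List.mem_cons, List.not_mem_nil, or_false] at hu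
      rcases hu with rfl | rfl
      · exact ⟨"verify you are human", (mem _).mpr (by tauto), rfl, by decide⟩
      · exact ⟨"verification required", (mem _).mpr (by tauto), rfl, by decide⟩
    · rintro ⟨t, ht, rfl, hh⟩
      rcases (mem t).mp ht with rfl | rfl | rfl | rfl | rfl | rfl <;> revert hh <;> decide
  · subst h4
    constructor
    · intro hu
      simp only [List.mem_singleton] at hu
      exact ⟨"captcha", (mem _).mpr (by tauto), hu, hu ▸ (by decide)⟩
    · rintro ⟨t, ht, rfl, hh⟩
      rcases (mem t).mp ht with rfl | rfl | rfl | rfl | rfl | rfl <;> revert hh <;> decide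
  · subst h5
    constructor
    · intro hu
      simp only [List.mem_singleton] at hu
      exact ⟨"访问验证", (mem _).mpr (by tauto), hu, hu ▸ (by decide)⟩
    · rintro ⟨t, ht, rfl, hh⟩
      rcases (mem t).mp ht with rfl | rfl | rfl | rfl | rfl | rfl <;> revert hh <;> decide
  · constructor
    · intro h; simp at h
    · rintro ⟨t, ht, rfl, hh⟩
      rcases (mem t).mp ht with rfl | rfl | rfl | rfl | rfl | rfl
      · rw [show ("正在验证".toList.head? = some '正') from by decide] at hh
        exact (h1 (Option.some.inj hh).symm).elim
      · rw [show ("安全验证".toList.head? = some '安') from by decide] at hh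
        exact (h2 (Option.some.inj hh).symm).elim
      · rw [show ("verify you are human".toList.head? = some 'v') from by decide] at hh
        exact (h3 (Option.some.inj hh).symm).elim
      · rw [show ("verification required".toList.head? = some 'v') from by decide] at hh
        exact (h3 (Option.some.inj hh).symm).elim
      · rw [show ("captcha".toList.head? = some 'c') from by decide] at hh
        exact (h4 (Option.some.inj hh).symm).elim
      · rw [show ("访问验证".toList.head? = some '访') from by decide] at hh
        exact (h5 (Option.some.inj hh).symm).elim

lemma scan_iff_isIn (cs t : List Char) (ht : t ≠ []) :
    (∃ i < cs.length, t <+: cs.drop i) ↔ PySem.Chars.isIn t cs = true := by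
  rw [← PySem.Chars.exists_prefix_drop_iff_isIn]
  constructor
  · rintro ⟨i, _, h⟩; exact ⟨i, h⟩
  · rintro ⟨j, h⟩
    by_cases hj : j < cs.length
    · exact ⟨j, hj, h⟩
    · exact absurd (List.prefix_nil.mp (List.drop_eq_nil_of_le (le_of_not_gt hj) ▸ h)) ht

lemma tokens_nonempty : ∀ tok ∈ pvTokens, tok.toList ≠ [] := by decide

-- head of a nonempty prefix of cs.drop i equals cs[i]
lemma prefix_head (cs t : List Char) (i : Nat) (_hi : i < cs.length) (hp : t <+: cs.drop i)
    (ht : t ≠ []) : t.head? = cs[i]? := by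
  obtain ⟨r, hr⟩ := hp
  have : (cs.drop i).head? = t.head? := by
    rw [← hr, List.head?_append_of_ne_nil _ ht]
  rw [← this, List.head?_drop]

-- ===== VERDICT =====
theorem looks_like_verification_wall_py_spec : Claim_equal_looks_like_verification_wall_py := by
  intro title content _
  unfold Spec_looks_like_verification_wall_py
  unfold looks_like_verification_wall_py looks_like_verification_wall_py_alt
  simp only
  have hcs : (PySem.Str.lower ((title.getD "") ++ " " ++ (content.getD ""))).toList
      = PySem.Chars.lower (title.getD "").toList ++ [' '] ++ PySem.Chars.lower (content.getD "").toList := by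
    (simp [PySem.Str.toList_lower, PySem.Chars.lower, List.map_append]; decide)
  generalize hgen : PySem.Chars.lower (title.getD "").toList ++ [' '] ++ PySem.Chars.lower (content.getD "").toList = cs at hcs ⊢
  rw [Bool.eq_iff_iff]
  simp only [List.any_eq_true, PySem.Str.isIn_eq, hcs, PySem.Chars.startswith_iff,
    PySem.List.mem_enumerate_iff]
  constructor
  · rintro ⟨tok, hmem, hin⟩
    obtain ⟨i, hi, hpre⟩ := (scan_iff_isIn _ _ (tokens_nonempty tok hmem)).mpr hin
    refine ⟨(i, cs[i]), ⟨i, hi, by simp⟩, tok.toList, ?_, ?_⟩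
    · rw [byFirst_spec]
      refine ⟨tok, hmem, rfl, ?_⟩
      rw [prefix_head cs tok.toList i hi hpre (tokens_nonempty tok hmem)]
      simp [List.getElem?_eq_getElem hi]
    · simpa using hpre
  · rintro ⟨p, ⟨k, hk, rfl⟩, u, hu, hpre⟩
    rw [byFirst_spec] at hu
    obtain ⟨t, ht, rfl, _⟩ := hu
    refine ⟨t, ht, (scan_iff_isIn _ _ (tokens_nonempty t ht)).mp ⟨k, hk, ?_⟩⟩
    simpa using hpre
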